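-- pv_equiv track=rewrite | github.com/arusli1/IdleKV | phases/phase15_real_repo_relevance_shift/src/edge.py | line_char_bounds
-- ===== SOURCE A (Python) =====
-- def line_char_bounds(card_start: int, card: str, line_no: int) -> tuple[int, int]:
--     """Return raw-context char bounds for a source line inside a numbered card."""
--     offset = 0
--     lines = card.splitlines(keepends=True)
--     for current, line in enumerate(lines, start=1):
--         next_offset = offset + len(line)
--         if current == int(line_no) + 1:
--             return card_start + offset, card_start + next_offset
--         offset = next_offset
--     raise ValueError(f"Line {line_no} is outside generated card.")
-- ===== SOURCE B (Python) =====
-- def line_char_bounds(card_start: int, card: str, line_no: int) -> tuple[int, int]: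
--     """Return raw-context char bounds for a source line inside a numbered card."""
--     lines = card.splitlines(keepends=True)
--     idx = int(line_no)
--     if idx < 0 or idx >= len(lines):
--         raise ValueError(f"Line {line_no} is outside generated card.")
--     table = [0]
--     for line in lines:
--         table.append(table[-1] + len(line))
--     start = card_start + table[idx]
--     return start, start + len(lines[idx])
-- ===== Notes on version B (the rewrite author's own statement) =====
-- stated objective: alternative
-- what changed: Replaced A's enumerate-scan with early return by an upfront range check on the index plus a precomputed cumulative-offset table that is indexed directly.
import Mathlib
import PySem

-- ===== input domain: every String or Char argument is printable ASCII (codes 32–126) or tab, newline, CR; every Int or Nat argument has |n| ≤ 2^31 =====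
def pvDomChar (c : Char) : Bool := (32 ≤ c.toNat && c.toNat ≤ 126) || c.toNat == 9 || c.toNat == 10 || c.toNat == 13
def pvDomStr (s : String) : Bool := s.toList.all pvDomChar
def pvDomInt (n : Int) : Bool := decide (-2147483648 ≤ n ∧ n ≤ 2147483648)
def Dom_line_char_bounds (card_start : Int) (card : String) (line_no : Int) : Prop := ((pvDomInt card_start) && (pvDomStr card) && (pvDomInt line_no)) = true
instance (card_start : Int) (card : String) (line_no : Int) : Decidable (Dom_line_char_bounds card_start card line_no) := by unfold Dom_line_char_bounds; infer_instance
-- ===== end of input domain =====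

-- B changes the decomposition: an upfront range check and a precomputed cumulative-offset table
-- replace A's enumerate-scan with early return; same values everywhere A returns.

-- shared helper: card.splitlines(keepends=True), exact on the Dom alphabet
-- (the only line boundaries occurring in Dom are '\n', '\r' and '\r\n')
def slk : List Char → List Char → List (List Char)
  | [], cur => if cur = [] then [] else [cur.reverse]
  | '\n' :: rest, cur => (cur.reverse ++ ['\n']) :: slk rest []
  | '\r' :: '\n' :: rest, cur => (cur.reverse ++ ['\r', '\n']) :: slk rest []
  | '\r' :: rest, cur => (cur.reverse ++ ['\r']) :: slk rest []
  | c :: rest, cur => slk rest (c :: cur)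

def splitlinesKeep (s : List Char) : List (List Char) := slk s []

-- ===== PORT A =====
-- the for-loop with early return; none = the ValueError at the end
def lcbLoopA (card_start line_no : Int) : List (List Char) → Int → Int → Option (Int × Int)
  | [], _, _ => none
  | l :: rest, current, offset =>
      let next_offset := offset + (l.length : Int)
      if current = line_no + 1 then some (card_start + offset, card_start + next_offset)
      else lcbLoopA card_start line_no rest (current + 1) next_offset

def line_char_bounds (card_start : Int) (card : String) (line_no : Int) : Int × Int :=
  (lcbLoopA card_start line_no (splitlinesKeep card.toList) 1 0).getD (0, 0)

-- ===== PORT B =====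
-- table = [0]; for line in lines: table.append(table[-1] + len(line))
def offsetsB (acc : Int) : List (List Char) → List Int
  | [] => [acc]
  | l :: rest => acc :: offsetsB (acc + (l.length : Int)) rest

def line_char_bounds_alt (card_start : Int) (card : String) (line_no : Int) : Int × Int :=
  let lines := splitlinesKeep card.toList
  if line_no < 0 ∨ (lines.length : Int) ≤ line_no then (0, 0)  -- B raises ValueError here
  else
    let table := offsetsB 0 lines
    let start := card_start + table.getD line_no.toNat 0
    (start, start + ((lines.getD line_no.toNat []).length : Int))

-- ===== PRECONDITION & SPEC =====
-- Pre_ excludes exactly the inputs on which A raises ValueError (line_no outside the card's lines)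
def Pre_line_char_bounds (card_start : Int) (card : String) (line_no : Int) : Prop :=
  0 ≤ line_no ∧ line_no < ((splitlinesKeep card.toList).length : Int)
instance (card_start : Int) (card : String) (line_no : Int) : Decidable (Pre_line_char_bounds card_start card line_no) := by unfold Pre_line_char_bounds; infer_instance

def pvWitness_line_char_bounds : Int × String × Int := (7, "ab\ncd\r\ne", 1)

def Spec_line_char_bounds (card_start : Int) (card : String) (line_no : Int) (out : Int × Int) : Prop := out = line_char_bounds_alt card_start card line_no
instance (card_start : Int) (card : String) (line_no : Int) (out : Int × Int) : Decidable (Spec_line_char_bounds card_start card line_no out) := by unfold Spec_line_char_bounds; infer_instance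

-- ===== CLAIM (what is proved, stated in full; the proofs are below) =====
def Claim_equal_line_char_bounds : Prop := ∀ (card_start : Int) (card : String) (line_no : Int), Dom_line_char_bounds card_start card line_no → Pre_line_char_bounds card_start card line_no → Spec_line_char_bounds card_start card line_no (line_char_bounds card_start card line_no)

-- ===== LEMMAS AND PROOFS =====

def sumlen (ls : List (List Char)) : Int := (ls.map (fun l => (l.length : Int))).sum

theorem lcbLoopA_eq (card_start line_no : Int) :
    ∀ (lines : List (List Char)) (j : Nat) (c off : Int), c + (j : Int) = line_no + 1 →
      lcbLoopA card_start line_no lines c off =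
        if j < lines.length then
          some (card_start + off + sumlen (lines.take j),
                card_start + off + sumlen (lines.take j) + ((lines.getD j []).length : Int))
        else none := by
  intro lines
  induction lines with
  | nil => intro j c off h; simp [lcbLoopA]
  | cons l rest ih =>
    intro j c off h
    cases j with
    | zero =>
      have hc : c = line_no + 1 := by omega
      simp [lcbLoopA, hc, sumlen]
      ring
    | succ j' =>
      have hc : ¬ c = line_no + 1 := by omega
      have h' : (c + 1) + (j' : Int) = line_no + 1 := by push_cast at h ⊢; omega
      simp only [lcbLoopA, hc, if_false]
      rw [ih j' (c + 1) (off + (l.length : Int)) h']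
      by_cases hj : j' < rest.length
      · have : j' + 1 < (l :: rest).length := by simpa using Nat.succ_lt_succ hj
        simp [hj, sumlen, List.take_succ_cons]
        ring
      · have : ¬ (j' + 1 < (l :: rest).length) := by simpa using hj
        simp [hj]

theorem offsetsB_getD (acc : Int) :
    ∀ (lines : List (List Char)) (j : Nat), j ≤ lines.length →
      (offsetsB acc lines).getD j 0 = acc + sumlen (lines.take j) := by
  intro lines
  induction lines generalizing acc with
  | nil =>
    intro j hj
    have hj0 : j = 0 := Nat.le_zero.mp (by simpa using hj)
    subst hj0; simp [offsetsB, sumlen]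
  | cons l rest ih =>
    intro j hj
    cases j with
    | zero => simp [offsetsB, sumlen]
    | succ j' =>
      have hj' : j' ≤ rest.length := by simpa using hj
      simp only [offsetsB, List.getD_cons_succ, List.take_succ_cons]
      rw [ih (acc + (l.length : Int)) j' hj']
      simp [sumlen]; ring

-- ===== VERDICT (by name: the statement is the Claim_ definition above) =====
theorem line_char_bounds_spec : Claim_equal_line_char_bounds := by
  intro card_start card line_no _ hpre
  obtain ⟨h0, hlt⟩ := hpre
  set lines := splitlinesKeep card.toList with hl
  have hjeq : (line_no.toNat : Int) = line_no := Int.toNat_of_nonneg h0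
  have hjlt : line_no.toNat < lines.length := by omega
  unfold Spec_line_char_bounds line_char_bounds line_char_bounds_alt
  rw [lcbLoopA_eq card_start line_no lines line_no.toNat 1 0 (by omega)]
  have hcond : ¬ (line_no < 0 ∨ (lines.length : Int) ≤ line_no) := by omega
  simp only [hjlt, if_true, Option.getD_some]
  rw [offsetsB_getD 0 lines line_no.toNat (Nat.le_of_lt hjlt), ← hl, if_neg hcond]
  simp only [Prod.mk.injEq]
  constructor <;> ring
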